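-- pv_equiv track=rewrite | github.com/NagaJSwamy/Automation-testing | Python/Basic Programs/n-th multiple Fibonacci.py | nth_multiple_recursive
-- ===== SOURCE A (Python) =====
-- def fib_memo(k, memo={0: 0, 1: 1}):
--     if k not in memo:
--         memo[k] = fib_memo(k - 1, memo) + fib_memo(k - 2, memo)
--     return memo[k]
--
-- def nth_multiple_recursive(n, m):
--     count, idx = 0, 2
--     while True:
--         value = fib_memo(idx)
--         if value % m == 0:
--             count += 1
--             if count == n:
--                 return value
--         idx += 1
-- ===== SOURCE B (Python) =====
-- def nth_multiple_recursive(n, m):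
--     # Iterative rolling-pair scan (O(1) state) instead of memoized recursion with an unbounded dict.
--     count = 0
--     a, b = 1, 2  # F(2), F(3): same starting index as the original
--     while True:
--         if a % m == 0:
--             count += 1
--             if count == n:
--                 return a
--         a, b = b, a + b
-- ===== Notes on version B (the rewrite author's own statement) =====
-- stated objective: simpler
-- what changed: B generates Fibonacci numbers with an O(1)-state rolling pair (a, b = b, a+b) in a plain loop instead of A's memoized recursive helper with an ever-growing dict, keeping the same scan-and-count of multiples of m.
import Mathlib
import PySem

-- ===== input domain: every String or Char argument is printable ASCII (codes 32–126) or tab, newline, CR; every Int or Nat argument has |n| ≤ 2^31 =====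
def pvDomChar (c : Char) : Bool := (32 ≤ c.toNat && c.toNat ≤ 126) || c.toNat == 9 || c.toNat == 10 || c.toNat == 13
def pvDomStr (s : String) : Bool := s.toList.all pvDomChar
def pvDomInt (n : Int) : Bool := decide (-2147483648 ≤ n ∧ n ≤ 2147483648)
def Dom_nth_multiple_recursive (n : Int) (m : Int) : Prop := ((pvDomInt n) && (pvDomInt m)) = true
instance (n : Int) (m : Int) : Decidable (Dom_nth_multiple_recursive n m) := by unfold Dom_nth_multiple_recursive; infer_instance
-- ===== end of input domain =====

-- B replaces A's memoized recursion + unbounded dict with an O(1)-state rolling pair of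
-- consecutive Fibonacci numbers (constant-factor speed-up; return value only — A's Python
-- additionally mutates its persistent default-argument memo dict, which B has no need for).

-- ===== PORT A =====
-- fib_memo(k, memo): the memo dict is threaded explicitly (Python mutates it in place).
-- The memo is internal to A (it never crosses the function boundary), so it is ported as
-- Std.HashMap, which has exactly Python-dict lookup/insert/membership semantics for the
-- unique Int keys used and Python-dict O(1) cost (the assoc-list dict would make this port
-- quadratic and un-evaluable on realistic inputs; insertion order is never observed).
-- The k ≤ 1 ∧ k ∉ memo branch returns 0 here; in Python it recurses forever — A never reaches
-- it, because the seeded memo always contains keys 0 and 1.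
def fibMemoA (k : Int) (memo : Std.HashMap Int Int) : Int × Std.HashMap Int Int :=
  match memo[k]? with
  | some v => (v, memo)                       -- k in memo: return memo[k]
  | none =>
    if _h : 2 ≤ k then
      let r1 := fibMemoA (k - 1) memo
      let r2 := fibMemoA (k - 2) r1.2
      let memo3 := r2.2.insert k (r1.1 + r2.1)  -- memo[k] = fib_memo(k-1) + fib_memo(k-2)
      (memo3.getD k 0, memo3)                  -- return memo[k]
    else
      (0, memo)
termination_by k.toNat
decreasing_by all_goals omega

-- while True: fuel makes the loop total (fuel only guards termination; A never exhausts it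
-- on the tested inputs); 0 on exhaustion is never the claimed value of a terminating run.
def loopA (n m : Int) : Nat → Int → Int → Std.HashMap Int Int → Int
  | 0, _, _, _ => 0
  | fuel+1, count, idx, memo =>
    let r := fibMemoA idx memo                 -- value = fib_memo(idx)
    if PySem.Int.mod r.1 m = 0 then
      if count + 1 = n then r.1                -- count += 1; if count == n: return value
      else loopA n m fuel (count + 1) (idx + 1) r.2
    else loopA n m fuel count (idx + 1) r.2    -- idx += 1

def nth_multiple_recursive (n : Int) (m : Int) : Int :=
  loopA n m (2^70) 0 2 (((∅ : Std.HashMap Int Int).insert 0 0).insert 1 1)  -- memo = {0: 0, 1: 1}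

-- ===== PORT B =====
def loopB (n m : Int) : Nat → Int → Int → Int → Int
  | 0, _, _, _ => 0
  | fuel+1, count, a, b =>
    if PySem.Int.mod a m = 0 then
      if count + 1 = n then a
      else loopB n m fuel (count + 1) b (a + b)
    else loopB n m fuel count b (a + b)        -- a, b = b, a + b

def nth_multiple_recursive_alt (n : Int) (m : Int) : Int :=
  loopB n m (2^70) 0 1 2

-- ===== PRECONDITION & SPEC =====
-- Pre_ excludes exactly the inputs where the Python A does not return: m = 0 raises
-- ZeroDivisionError and n ≤ 0 loops forever (count == n is never reached).
def Pre_nth_multiple_recursive (n : Int) (m : Int) : Prop := 1 ≤ n ∧ m ≠ 0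
instance (n : Int) (m : Int) : Decidable (Pre_nth_multiple_recursive n m) := by
  unfold Pre_nth_multiple_recursive; infer_instance

def pvWitness_nth_multiple_recursive : Int × Int := (1, 2)

def Spec_nth_multiple_recursive (n : Int) (m : Int) (out : Int) : Prop := out = nth_multiple_recursive_alt n m
instance (n : Int) (m : Int) (out : Int) : Decidable (Spec_nth_multiple_recursive n m out) := by
  unfold Spec_nth_multiple_recursive; infer_instance

-- ===== CLAIM (what is proved, stated in full; the proofs are below) =====
def Claim_equal_nth_multiple_recursive : Prop := ∀ (n : Int) (m : Int), Dom_nth_multiple_recursive n m → Pre_nth_multiple_recursive n m → Spec_nth_multiple_recursive n m (nth_multiple_recursive n m)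

-- ===== LEMMAS AND PROOFS =====

-- the memo A's loop carries after idx has reached i+1: the Fibonacci table on keys 0..i
def fibTable : Nat → Std.HashMap Int Int
  | 0 => (∅ : Std.HashMap Int Int).insert 0 0
  | i+1 => (fibTable i).insert ((i:Int)+1) (Nat.fib (i+1))

theorem get?_fibTable (i : Nat) (j : Int) :
    (fibTable i)[j]? = if 0 ≤ j ∧ j ≤ (i:Int) then some ((Nat.fib j.toNat : Int)) else none := by
  induction i with
  | zero =>
    simp only [fibTable, Std.HashMap.getElem?_insert, beq_iff_eq]
    by_cases h : (0:Int) = j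
    · subst h; simp
    · rw [if_neg h, if_neg (by omega), Std.HashMap.getElem?_empty]
  | succ i ih =>
    simp only [fibTable, Std.HashMap.getElem?_insert, beq_iff_eq]
    by_cases h : (i:Int) + 1 = j
    · subst h
      rw [if_pos rfl, if_pos (by constructor <;> omega),
        show (((i:Int)+1)).toNat = i + 1 by omega]
    · rw [if_neg h, ih]
      by_cases h2 : 0 ≤ j ∧ j ≤ (i:Int)
      · rw [if_pos h2, if_pos ⟨h2.1, by omega⟩]
      · rw [if_neg h2, if_neg (by omega)]

theorem fibMemoA_hit (i : Nat) (j : Int) (h0 : 0 ≤ j) (h1 : j ≤ (i:Int)) :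
    fibMemoA j (fibTable i) = ((Nat.fib j.toNat : Int), fibTable i) := by
  rw [fibMemoA, get?_fibTable, if_pos ⟨h0, h1⟩]

theorem fibMemoA_step (i : Nat) (h : 1 ≤ i) :
    fibMemoA ((i:Int)+1) (fibTable i) = ((Nat.fib (i+1) : Int), fibTable (i+1)) := by
  rw [fibMemoA, get?_fibTable]
  rw [if_neg (by omega)]
  simp only
  rw [dif_pos (by omega)]
  have e1 : (i:Int) + 1 - 1 = (i:Int) := by ring
  have e2 : (i:Int) + 1 - 2 = ((i-1 : Nat):Int) := by omega
  rw [e1, e2]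
  simp only [fibMemoA_hit i ((i:Int)) (by omega) (by omega),
    fibMemoA_hit i (((i-1:Nat):Int)) (by omega) (by omega)]
  have hfib : ((Nat.fib ((i:Int).toNat) : Int)) + ((Nat.fib (((i-1:Nat):Int).toNat) : Int))
      = (Nat.fib (i + 1) : Int) := by
    rw [show ((i:Int)).toNat = i by omega, show (((i-1:Nat):Int)).toNat = i - 1 by omega]
    have h2 := Nat.fib_add_two (n := i - 1)
    rw [show i - 1 + 2 = i + 1 by omega, show i - 1 + 1 = i by omega] at h2
    rw [h2]; push_cast; ring
  rw [hfib]
  have htab : fibTable (i + 1) = (fibTable i).insert ((i:Int)+1) (Nat.fib (i+1)) := rfl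
  rw [htab, Std.HashMap.getD_insert_self]

theorem loopAB (fuel : Nat) : ∀ (n m count : Int) (i : Nat), 1 ≤ i →
    loopA n m fuel count ((i:Int)+1) (fibTable i)
      = loopB n m fuel count (Nat.fib (i+1)) (Nat.fib (i+2)) := by
  induction fuel with
  | zero => intros; rfl
  | succ fuel ih =>
    intro n m count i hi
    rw [loopA, loopB, fibMemoA_step i hi]
    have hnext : ((i:Int)+1) + 1 = (((i+1:Nat)):Int) + 1 := by push_cast; ring
    have hfib3 : (Nat.fib (i+1) : Int) + (Nat.fib (i+2) : Int) = ((Nat.fib (i+3) : Int)) := by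
      have h2 := Nat.fib_add_two (n := i + 1)
      rw [show i + 1 + 2 = i + 3 by omega, show i + 1 + 1 = i + 2 by omega] at h2
      exact_mod_cast h2.symm
    have h1 := ih n m (count+1) (i+1) (by omega)
    have h0 := ih n m count (i+1) (by omega)
    rw [show i+1+1 = i+2 by omega, show i+1+2 = i+3 by omega] at h1 h0
    simp only
    split_ifs with hc1 hc2
    · rfl
    · rw [hnext, h1, hfib3]
    · rw [hnext, h0, hfib3]

-- ===== VERDICT (by name: the statement is the Claim_ definition above) =====
theorem nth_multiple_recursive_spec : Claim_equal_nth_multiple_recursive := by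
  intro n m _ _
  unfold Spec_nth_multiple_recursive nth_multiple_recursive nth_multiple_recursive_alt
  have h := loopAB (2^70) n m 0 1 (le_refl 1)  -- the seeded memo {0: 0, 1: 1} is fibTable 1 by rfl
  norm_num at h ⊢
  exact h
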